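-- pv_equiv track=rewrite | github.com/Atoomyk/MAX_bot_PR | user_database.py | normalize_fio
-- ===== SOURCE A (Python) =====
-- def normalize_fio(fio: str) -> str:
--     """Приводит каждое слово ФИО к формату «Слово» (первая заглавная, остальные строчные)."""
--     if not fio or not fio.strip():
--         return fio
--     fio_cleaned = ' '.join(fio.split())
--     words = fio_cleaned.split()
--     result = []
--     for word in words:
--         if '-' in word:
--             parts = [p.capitalize() if p else '' for p in word.split('-')]
--             result.append('-'.join(parts))
--         else:
--             result.append(word.capitalize())
--     return ' '.join(result)
-- ===== SOURCE B (Python) =====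
-- def normalize_fio(fio: str) -> str:
--     """Single character pass: uppercase a char at the start of a word/hyphen part, lowercase elsewhere."""
--     if not fio or not fio.strip():
--         return fio
--     out = []
--     new_part = True
--     for ch in ' '.join(fio.split()):
--         out.append(ch.upper() if new_part else ch.lower())
--         new_part = ch == ' ' or ch == '-'
--     return ''.join(out)
-- ===== Notes on version B (the rewrite author's own statement) =====
-- stated objective: simpler
-- what changed: B replaces A's per-word loop with hyphen splitting, per-part capitalize() and double rejoin by a single character pass over the whitespace-collapsed string that uppercases a character at the start of each word/hyphen part and lowercases it elsewhere.
import Mathlib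
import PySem

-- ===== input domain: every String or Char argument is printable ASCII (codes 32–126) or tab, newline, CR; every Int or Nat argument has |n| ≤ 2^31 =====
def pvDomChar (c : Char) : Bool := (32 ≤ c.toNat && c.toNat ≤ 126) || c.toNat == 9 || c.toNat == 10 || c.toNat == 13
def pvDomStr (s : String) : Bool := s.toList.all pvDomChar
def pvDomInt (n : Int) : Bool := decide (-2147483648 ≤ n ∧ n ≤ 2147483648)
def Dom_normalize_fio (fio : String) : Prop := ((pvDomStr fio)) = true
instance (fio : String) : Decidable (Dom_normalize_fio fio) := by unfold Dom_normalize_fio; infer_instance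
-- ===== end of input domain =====

-- B replaces A's per-word loop with hyphen splitting/rejoining by a single character pass
-- (uppercase at a word/part start, lowercase elsewhere) — objective: simpler, same cost.

-- ===== PORT A =====
-- p.capitalize(): first char to upper, the rest to lower (exact on the ASCII domain)
def pyCapitalize (w : List Char) : List Char :=
  match w with
  | [] => []
  | c :: cs => PySem.Chars.upperChar c :: PySem.Chars.lower cs

def normalize_fio (fio : String) : String :=
  if fio.toList = [] ∨ (PySem.Str.strip fio).toList = [] then fio
  else
    let fio_cleaned := PySem.Chars.join [' '] (PySem.Chars.split₀ fio.toList)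
    let words := PySem.Chars.split₀ fio_cleaned
    let result := words.foldl (fun acc word =>
      if PySem.Chars.isIn ['-'] word then
        acc ++ [PySem.Chars.join ['-']
          ((PySem.Chars.splitOn word ['-']).map (fun p => if p = [] then [] else pyCapitalize p))]
      else acc ++ [pyCapitalize word]) []
    String.ofList (PySem.Chars.join [' '] result)

-- ===== PORT B =====
def normalize_fio_alt (fio : String) : String :=
  if fio.toList = [] ∨ (PySem.Str.strip fio).toList = [] then fio
  else
    let cleaned := PySem.Chars.join [' '] (PySem.Chars.split₀ fio.toList)
    String.ofList (cleaned.foldl (fun st ch =>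
        (st.1 ++ [if st.2 then PySem.Chars.upperChar ch else PySem.Chars.lowerChar ch],
         ch == ' ' || ch == '-')) (([] : List Char), true)).1

-- ===== PRECONDITION & SPEC =====
def Spec_normalize_fio (fio : String) (out : String) : Prop := out = normalize_fio_alt fio
instance (fio : String) (out : String) : Decidable (Spec_normalize_fio fio out) := by unfold Spec_normalize_fio; infer_instance

-- ===== CLAIM (what is proved, stated in full; the proofs are below) =====
def Claim_equal_normalize_fio : Prop := ∀ (fio : String), Dom_normalize_fio fio → Spec_normalize_fio fio (normalize_fio fio)

-- ===== LEMMAS AND PROOFS =====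

-- part boundary: the characters after which B restarts capitalization
def pvBd (c : Char) : Bool := c == ' ' || c == '-'

-- reference state machine for B's character pass
def pvSm : Bool → List Char → List Char
  | _, [] => []
  | b, c :: cs => (if b then PySem.Chars.upperChar c else PySem.Chars.lowerChar c) :: pvSm (pvBd c) cs

-- simple structural recursion equal to PySem.Chars.splitOn · ['-']
def pvHSplit : List Char → List Char → List (List Char)
  | pre, [] => [pre]
  | pre, c :: rest => if c = '-' then pre :: pvHSplit [] rest else pvHSplit (pre ++ [c]) rest

theorem pvSm_foldl (cs : List Char) (acc : List Char) (b : Bool) :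
    (cs.foldl (fun st ch =>
        (st.1 ++ [if st.2 then PySem.Chars.upperChar ch else PySem.Chars.lowerChar ch],
         ch == ' ' || ch == '-')) (acc, b)).1 = acc ++ pvSm b cs := by
  induction cs generalizing acc b with
  | nil => simp [pvSm]
  | cons c cs ih => simp [pvSm, pvBd, ih]

theorem pvFoldl_ite {α β : Type} (p : α → Bool) (f g : α → β) (l : List α) (acc : List β) :
    l.foldl (fun a x => if p x then a ++ [f x] else a ++ [g x]) acc
      = acc ++ l.map (fun x => if p x then f x else g x) := by
  induction l generalizing acc with
  | nil => simp
  | cons x l ih => by_cases hx : p x <;> simp [hx, ih]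

theorem pvSm_append_sep (c : Char) (hu : PySem.Chars.upperChar c = c)
    (hl : PySem.Chars.lowerChar c = c) (hb : pvBd c = true) :
    ∀ (w : List Char) (b : Bool) (rest : List Char),
      pvSm b (w ++ c :: rest) = pvSm b w ++ c :: pvSm true rest := by
  intro w
  induction w with
  | nil => intro b rest; cases b <;> simp [pvSm, hu, hl, hb]
  | cons d w ih => intro b rest; simp [pvSm, ih]

theorem pvSm_false_lower (w : List Char) (h : ∀ c ∈ w, pvBd c = false) :
    pvSm false w = PySem.Chars.lower w := by
  induction w with
  | nil => simp [pvSm, PySem.Chars.lower]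
  | cons c cs ih =>
    have hc := h c (by simp)
    simp [pvSm, PySem.Chars.lower, hc, ih (fun d hd => h d (by simp [hd]))]

theorem pvSm_cap (w : List Char) (h : ∀ c ∈ w, pvBd c = false) :
    pvSm true w = pyCapitalize w := by
  cases w with
  | nil => simp [pvSm, pyCapitalize]
  | cons c cs =>
    have hc := h c (by simp)
    simp [pvSm, pyCapitalize, hc,
      pvSm_false_lower cs (fun d hd => h d (by simp [hd]))]

theorem pvHSplit_ne_nil (pre l : List Char) : pvHSplit pre l ≠ [] := by
  induction l generalizing pre with
  | nil => simp [pvHSplit]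
  | cons c rest ih => by_cases hc : c = '-' <;> simp [pvHSplit, hc, ih]

theorem pvHSplit_join (pre l : List Char) :
    PySem.Chars.join ['-'] (pvHSplit pre l) = pre ++ l := by
  induction l generalizing pre with
  | nil => simp [pvHSplit, PySem.Chars.join_singleton]
  | cons c rest ih =>
    by_cases hc : c = '-'
    · obtain ⟨q, qs, hq⟩ : ∃ q qs, pvHSplit ([] : List Char) rest = q :: qs := by
        cases hh : pvHSplit ([] : List Char) rest with
        | nil => exact absurd hh (pvHSplit_ne_nil [] rest)
        | cons q qs => exact ⟨q, qs, rfl⟩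
      have := ih ([] : List Char)
      rw [hq] at this
      simp [pvHSplit, hc, hq, PySem.Chars.join_cons_cons, this]
    · simp [pvHSplit, hc, ih (pre ++ [c])]

theorem pvHSplit_parts (pre l : List Char)
    (hpre : ∀ c ∈ pre, pvBd c = false) (hl : ∀ c ∈ l, PySem.Chars.isspace c = false) :
    ∀ p ∈ pvHSplit pre l, ∀ c ∈ p, pvBd c = false := by
  induction l generalizing pre with
  | nil =>
    intro p hp
    simp [pvHSplit] at hp
    subst hp; exact hpre
  | cons c rest ih =>
    have hrest : ∀ d ∈ rest, PySem.Chars.isspace d = false := fun d hd => hl d (by simp [hd])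
    by_cases hc : c = '-'
    · intro p hp
      simp [pvHSplit, hc] at hp
      rcases hp with hp | hp
      · subst hp; exact hpre
      · exact ih [] (by simp) hrest p hp
    · have hcs : PySem.Chars.isspace c = false := hl c (by simp)
      have hcb : pvBd c = false := by
        simp [pvBd]
        refine ⟨fun h => ?_, hc⟩
        rw [h] at hcs; exact absurd hcs (by decide)
      intro p hp
      simp only [pvHSplit, if_neg hc] at hp
      exact ih (pre ++ [c]) (by
        intro d hd
        rcases List.mem_append.mp hd with h1 | h1
        · exact hpre d h1
        · simp at h1; subst h1; exact hcb) hrest p hp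

theorem pvGoHSplit (fuel : Nat) : ∀ (l cur : List Char) (accl : List (List Char)),
    l.length < fuel →
    PySem.Chars.splitOn.go ['-'] fuel l cur accl = accl.reverse ++ pvHSplit cur.reverse l := by
  induction fuel with
  | zero => intro l cur accl h; omega
  | succ fuel ih =>
    intro l cur accl h
    cases l with
    | nil => simp [PySem.Chars.splitOn.go, pvHSplit]
    | cons c rest =>
      by_cases hc : c = '-'
      · subst hc
        rw [PySem.Chars.splitOn.go]
        simp only [List.isPrefixOf, BEq.rfl, Bool.true_and, if_pos, List.length_nil,
          List.length_cons, List.drop_succ_cons, List.drop_zero]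
        rw [ih rest [] (cur.reverse :: accl) (by simp at h ⊢; omega)]
        simp [pvHSplit]
      · rw [PySem.Chars.splitOn.go]
        have hpre : (['-'] : List Char).isPrefixOf (c :: rest) = false := by
          simp [List.isPrefixOf]; exact fun h => absurd h.symm hc
        simp only [hpre, Bool.false_eq_true, if_false]
        rw [ih rest (c :: cur) accl (by simp at h ⊢; omega)]
        simp [pvHSplit, hc]

theorem pvSplitOn_eq_hsplit (w : List Char) :
    PySem.Chars.splitOn w ['-'] = pvHSplit [] w := by
  have := pvGoHSplit (w.length + 1) w [] [] (by omega)
  simpa [PySem.Chars.splitOn] using this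

theorem pvJoinCap (parts : List (List Char))
    (h : ∀ p ∈ parts, ∀ c ∈ p, pvBd c = false) :
    PySem.Chars.join ['-'] (parts.map pyCapitalize) = pvSm true (PySem.Chars.join ['-'] parts) := by
  induction parts with
  | nil => simp [PySem.Chars.join_nil, pvSm]
  | cons p ps ih =>
    cases ps with
    | nil => simp [PySem.Chars.join_singleton, pvSm_cap p (h p (by simp))]
    | cons q qs =>
      have ihx := ih (fun r hr => h r (by simp [hr]))
      rw [List.map_cons] at ihx
      rw [List.map_cons, List.map_cons, PySem.Chars.join_cons_cons,
        PySem.Chars.join_cons_cons, ihx]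
      have hsep : (p ++ ['-'] ++ PySem.Chars.join ['-'] (q :: qs))
          = p ++ '-' :: PySem.Chars.join ['-'] (q :: qs) := by simp
      rw [hsep, pvSm_append_sep '-' (by decide) (by decide) (by decide)]
      rw [pvSm_cap p (h p (by simp))]
      simp

theorem pvPerWord (w : List Char) (hsp : ∀ c ∈ w, PySem.Chars.isspace c = false) :
    (if PySem.Chars.isIn ['-'] w then
        PySem.Chars.join ['-']
          ((PySem.Chars.splitOn w ['-']).map (fun p => if p = [] then [] else pyCapitalize p))
      else pyCapitalize w) = pvSm true w := by
  by_cases hin : PySem.Chars.isIn ['-'] w = true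
  · rw [if_pos hin, pvSplitOn_eq_hsplit]
    have hmap : (pvHSplit [] w).map (fun p => if p = [] then [] else pyCapitalize p)
        = (pvHSplit [] w).map pyCapitalize := by
      apply List.map_congr_left
      intro p _
      by_cases hp : p = [] <;> simp [hp, pyCapitalize]
    rw [hmap, pvJoinCap _ (pvHSplit_parts [] w (by simp) hsp), pvHSplit_join]
    simp
  · rw [if_neg hin]
    have hnot : ¬ (['-'] : List Char) <:+: w :=
      (PySem.Chars.isIn_eq_false_iff ['-'] w).mp (by simpa using hin)
    refine (pvSm_cap w ?_).symm
    intro c hc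
    have hcd : c ≠ '-' := by
      intro h
      subst h
      obtain ⟨s, t, hst⟩ := List.append_of_mem hc
      exact hnot ⟨s, t, by simp [hst]⟩
    have hcs := hsp c hc
    simp [pvBd, hcd]
    intro h
    rw [h] at hcs; exact absurd hcs (by decide)

theorem pvSentence (ws : List (List Char))
    (h : ∀ w ∈ ws, ∀ c ∈ w, PySem.Chars.isspace c = false) :
    PySem.Chars.join [' ']
      (ws.map (fun w => if PySem.Chars.isIn ['-'] w then
        PySem.Chars.join ['-']
          ((PySem.Chars.splitOn w ['-']).map (fun p => if p = [] then [] else pyCapitalize p))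
      else pyCapitalize w))
      = pvSm true (PySem.Chars.join [' '] ws) := by
  induction ws with
  | nil => simp [PySem.Chars.join_nil, pvSm]
  | cons w ws ih =>
    cases ws with
    | nil =>
      simp only [List.map_cons, List.map_nil, PySem.Chars.join_singleton]
      exact pvPerWord w (h w (by simp))
    | cons v vs =>
      have ihx := ih (fun r hr => h r (by simp [hr]))
      rw [List.map_cons] at ihx
      rw [List.map_cons, List.map_cons, PySem.Chars.join_cons_cons,
        PySem.Chars.join_cons_cons, ihx]
      have hsep : (w ++ [' '] ++ PySem.Chars.join [' '] (v :: vs))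
          = w ++ ' ' :: PySem.Chars.join [' '] (v :: vs) := by simp
      rw [hsep, pvSm_append_sep ' ' (by decide) (by decide) (by decide)]
      rw [pvPerWord w (h w (by simp))]
      simp

theorem pvGoWord : ∀ (w : List Char), (∀ c ∈ w, PySem.Chars.isspace c = false) →
    ∀ (t cur : List Char) (acc : List (List Char)),
    PySem.Chars.split₀.go (w ++ t) cur acc = PySem.Chars.split₀.go t (w.reverse ++ cur) acc := by
  intro w
  induction w with
  | nil => intro _ t cur acc; simp
  | cons c w ih =>
    intro h t cur acc
    have hc := h c (by simp)
    rw [List.cons_append, PySem.Chars.split₀.go]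
    simp only [hc, Bool.false_eq_true, if_false]
    rw [ih (fun d hd => h d (by simp [hd])) t (c :: cur) acc]
    simp

theorem pvGoJoin : ∀ (ws : List (List Char)) (w : List Char),
    (∀ v ∈ w :: ws, v ≠ [] ∧ ∀ c ∈ v, PySem.Chars.isspace c = false) →
    ∀ (cur : List Char) (acc : List (List Char)),
    PySem.Chars.split₀.go (PySem.Chars.join [' '] (w :: ws)) cur acc
      = acc.reverse ++ (cur.reverse ++ w) :: ws := by
  intro ws
  induction ws with
  | nil =>
    intro w h cur acc
    obtain ⟨hne, hns⟩ := h w (by simp)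
    rw [PySem.Chars.join_singleton, show w = w ++ [] by simp, pvGoWord w hns [] cur acc]
    rw [PySem.Chars.split₀.go]
    have : (w.reverse ++ cur).isEmpty = false := by
      simp; intro hw; exact absurd hw hne
    simp [this]
  | cons v vs ih =>
    intro w h cur acc
    obtain ⟨hne, hns⟩ := h w (by simp)
    rw [PySem.Chars.join_cons_cons, List.append_assoc, List.singleton_append,
      pvGoWord w hns _ cur acc, PySem.Chars.split₀.go]
    have hsp : PySem.Chars.isspace ' ' = true := by decide
    have hemp : (w.reverse ++ cur).isEmpty = false := by
      simp; intro hw; exact absurd hw hne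
    simp only [hsp, hemp, if_true, Bool.false_eq_true, if_false]
    rw [ih v (fun r hr => h r (by simp at hr ⊢; tauto)) [] ((w.reverse ++ cur).reverse :: acc)]
    simp

theorem pvSplit₀_words (s : List Char) :
    ∀ w ∈ PySem.Chars.split₀ s, w ≠ [] ∧ ∀ c ∈ w, PySem.Chars.isspace c = false := by
  have main : ∀ (s cur : List Char) (acc : List (List Char)),
      (∀ c ∈ cur, PySem.Chars.isspace c = false) →
      (∀ w ∈ acc, w ≠ [] ∧ ∀ c ∈ w, PySem.Chars.isspace c = false) →
      ∀ w ∈ PySem.Chars.split₀.go s cur acc, w ≠ [] ∧ ∀ c ∈ w, PySem.Chars.isspace c = false := by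
    intro s
    induction s with
    | nil =>
      intro cur acc hcur hacc w hw
      rw [PySem.Chars.split₀.go] at hw
      by_cases hemp : cur.isEmpty
      · simp [hemp] at hw; exact hacc w hw
      · simp [hemp] at hw
        rcases hw with hw | hw
        · exact hacc w hw
        · subst hw
          constructor
          · simp at hemp; simpa using hemp
          · intro c hc; exact hcur c (by simpa using hc)
    | cons c rest ih =>
      intro cur acc hcur hacc w hw
      rw [PySem.Chars.split₀.go] at hw
      by_cases hc : PySem.Chars.isspace c
      · simp only [hc, if_true] at hw
        by_cases hemp : cur.isEmpty
        · simp only [hemp, if_true] at hw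
          exact ih [] acc (by simp) hacc w hw
        · simp only [hemp, Bool.false_eq_true, if_false] at hw
          refine ih [] (cur.reverse :: acc) (by simp) ?_ w hw
          intro v hv
          rcases List.mem_cons.mp hv with hv | hv
          · subst hv
            constructor
            · simp at hemp; simpa using hemp
            · intro d hd; exact hcur d (by simpa using hd)
          · exact hacc v hv
      · simp only [hc, Bool.false_eq_true, if_false] at hw
        refine ih (c :: cur) acc ?_ hacc w hw
        intro d hd
        rcases List.mem_cons.mp hd with hd | hd
        · subst hd; simpa using hc
        · exact hcur d hd
  exact main s [] [] (by simp) (by simp)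

theorem pvSplit₀_join (ws : List (List Char))
    (h : ∀ w ∈ ws, w ≠ [] ∧ ∀ c ∈ w, PySem.Chars.isspace c = false) :
    PySem.Chars.split₀ (PySem.Chars.join [' '] ws) = ws ∨ ws = [] := by
  cases ws with
  | nil => right; rfl
  | cons w ws =>
    left
    show PySem.Chars.split₀.go _ [] [] = _
    rw [pvGoJoin ws w h [] []]
    simp


-- ===== VERDICT (by name: the statement is the Claim_ definition above) =====
theorem normalize_fio_spec : Claim_equal_normalize_fio := by
  unfold Claim_equal_normalize_fio Spec_normalize_fio
  intro fio _
  unfold normalize_fio normalize_fio_alt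
  by_cases hg : fio.toList = [] ∨ (PySem.Str.strip fio).toList = []
  · rw [if_pos hg, if_pos hg]
  · rw [if_neg hg, if_neg hg]
    simp only [pvSm_foldl _ [] true, pvFoldl_ite, List.nil_append]
    congr 1
    rcases pvSplit₀_join (PySem.Chars.split₀ fio.toList) (pvSplit₀_words fio.toList) with hsj | hsj
    · rw [hsj]
      exact pvSentence _ (fun w hw => (pvSplit₀_words fio.toList w hw).2)
    · rw [hsj]
      simp [PySem.Chars.join_nil, PySem.Chars.split₀, PySem.Chars.split₀.go, pvSm]
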